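-- pv_equiv track=rewrite | github.com/meng-wenlong/DIA | src/ri/utils.py | post_process_prefix
-- ===== SOURCE A (Python) =====
-- def post_process_prefix(prefix: str) -> str:
--     '''Remove redundant phrases from the prefix.
--     '''
--     redundant_phrases = [
--         "but I",
--         "But I",
--         "I cannot",
--         "however",
--         "However",
--         "ethical considerations",
--         "though I must"
--     ]
--
--     min_index = len(prefix)
--
--     for phrase in redundant_phrases:
--         if phrase in prefix:
--             phrase_index = prefix.index(phrase)
--             if phrase_index < min_index:
--                 min_index = phrase_index
--
--     if min_index < len(prefix):
--         cut_prefix = prefix[:min_index].strip()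
--         last_punctuation = max(cut_prefix.rfind('.'), cut_prefix.rfind(','), cut_prefix.rfind(';'))
--         if last_punctuation != -1:
--             return cut_prefix[:last_punctuation+1]
--         else:
--             return cut_prefix
--
--     return prefix
-- ===== SOURCE B (Python) =====
-- def post_process_prefix(prefix: str) -> str:
--     '''Remove redundant phrases from the prefix.
--     '''
--     redundant_phrases = [
--         "but I",
--         "But I",
--         "I cannot",
--         "however",
--         "However",
--         "ethical considerations",
--         "though I must"
--     ]
--     # one left-to-right scan: first position where any redundant phrase starts
--     cut = next((i for i in range(len(prefix))
--                 if any(prefix.startswith(p, i) for p in redundant_phrases)), None)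
--     if cut is None:
--         return prefix
--     cut_prefix = prefix[:cut].strip()
--     # one backward scan for the last punctuation character
--     for j in range(len(cut_prefix) - 1, -1, -1):
--         if cut_prefix[j] in ".,;":
--             return cut_prefix[:j + 1]
--     return cut_prefix
-- ===== Notes on version B (the rewrite author's own statement) =====
-- stated objective: alternative
-- what changed: Replaces the per-phrase substring-scan-and-min loop by a single left-to-right positional scan that stops at the first index where any phrase starts, and replaces the three rfind calls plus max by one backward scan for the last punctuation character.
import Mathlib
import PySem

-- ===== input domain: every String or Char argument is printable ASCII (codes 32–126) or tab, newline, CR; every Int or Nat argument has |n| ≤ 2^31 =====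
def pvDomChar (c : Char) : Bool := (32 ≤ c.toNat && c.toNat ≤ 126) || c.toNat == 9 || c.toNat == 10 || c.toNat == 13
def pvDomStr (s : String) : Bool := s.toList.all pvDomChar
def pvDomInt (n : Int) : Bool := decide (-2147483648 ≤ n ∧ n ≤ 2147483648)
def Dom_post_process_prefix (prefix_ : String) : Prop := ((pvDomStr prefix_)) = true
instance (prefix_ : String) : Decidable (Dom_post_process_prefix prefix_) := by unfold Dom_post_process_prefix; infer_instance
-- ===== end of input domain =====

-- B replaces A's per-phrase scan-and-min loop by one left-to-right positional scan, and the
-- three rfinds + max by one backward scan (objective: alternative, same cost).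

-- ===== PORT A =====
def pvPhrasesA : List (List Char) :=
  ["but I".toList, "But I".toList, "I cannot".toList, "however".toList, "However".toList,
   "ethical considerations".toList, "though I must".toList]

def post_process_prefix (prefix_ : String) : String :=
  let cs := prefix_.toList
  let minIndex : Int :=
    pvPhrasesA.foldl (fun m phrase =>
      if PySem.Chars.isIn phrase cs then
        -- prefix.index(phrase): guarded by `in`, so it returns find (no ValueError)
        let phraseIndex := PySem.Chars.find cs phrase
        if phraseIndex < m then phraseIndex else m
      else m) ((cs.length : Int))
  if minIndex < (cs.length : Int) then
    let cutPrefix := PySem.Chars.strip (PySem.Chars.slice cs none (some minIndex))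
    let lastPunctuation : Int :=
      max (max (PySem.Chars.rfind cutPrefix ['.']) (PySem.Chars.rfind cutPrefix [',']))
          (PySem.Chars.rfind cutPrefix [';'])
    if lastPunctuation ≠ -1 then
      String.ofList (PySem.Chars.slice cutPrefix none (some (lastPunctuation + 1)))
    else
      String.ofList cutPrefix
  else
    prefix_

-- ===== PORT B =====
def pvPhrasesB : List (List Char) :=
  ["but I".toList, "But I".toList, "I cannot".toList, "however".toList, "However".toList,
   "ethical considerations".toList, "though I must".toList]

def post_process_prefix_alt (prefix_ : String) : String :=
  let cs := prefix_.toList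
  -- next((i for i in range(len(prefix)) if any(prefix.startswith(p, i) …)), None)
  -- prefix.startswith(p, i) with 0 ≤ i ≤ len(prefix) is startswith on the suffix from i
  match (List.range cs.length).find?
      (fun i => pvPhrasesB.any (fun p => PySem.Chars.startswith (cs.drop i) p)) with
  | none => prefix_
  | some cut =>
    let cutPrefix := PySem.Chars.strip (PySem.Chars.slice cs none (some (cut : Int)))
    -- for j in range(len(cut_prefix)-1, -1, -1): if cut_prefix[j] in ".,;": …
    match (List.range cutPrefix.length).reverse.find?
        (fun j => decide (cutPrefix[j]? = some '.' ∨ cutPrefix[j]? = some ',' ∨ cutPrefix[j]? = some ';')) with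
    | some j => String.ofList (PySem.Chars.slice cutPrefix none (some ((j : Int) + 1)))
    | none => String.ofList cutPrefix

-- ===== PRECONDITION & SPEC =====
def Spec_post_process_prefix (prefix_ : String) (out : String) : Prop := out = post_process_prefix_alt prefix_
instance (prefix_ : String) (out : String) : Decidable (Spec_post_process_prefix prefix_ out) := by unfold Spec_post_process_prefix; infer_instance

-- ===== CLAIM (what is proved, stated in full; the proofs are below) =====
def Claim_equal_post_process_prefix : Prop := ∀ (prefix_ : String), Dom_post_process_prefix prefix_ → Spec_post_process_prefix prefix_ (post_process_prefix prefix_)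

-- ===== LEMMAS AND PROOFS =====

-- find? over List.range: none means the predicate fails below n
theorem pvRange_find?_none {p : Nat → Bool} {n : Nat}
    (h : (List.range n).find? p = none) : ∀ j < n, p j = false := by
  intro j hj
  have := List.find?_eq_none.mp h j (List.mem_range.mpr hj)
  simpa using this

-- find? over List.range finds the least index satisfying the predicate
theorem pvRange_find?_some {p : Nat → Bool} {n i : Nat}
    (h : (List.range n).find? p = some i) :
    i < n ∧ p i = true ∧ ∀ j < i, p j = false := by
  induction n with
  | zero => simp [List.range_zero] at h
  | succ n ih =>
    rw [List.range_succ, List.find?_append] at h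
    cases hfn : (List.range n).find? p with
    | some i' =>
      rw [hfn] at h
      simp only [Option.some_or] at h
      obtain ⟨h1, h2, h3⟩ := ih (hfn.trans h)
      exact ⟨Nat.lt_succ_of_lt h1, h2, h3⟩
    | none =>
      rw [hfn] at h
      simp only [Option.none_or] at h
      by_cases hp : p n
      · simp [List.find?, hp] at h
        subst h
        exact ⟨Nat.lt_succ_self _, hp, pvRange_find?_none hfn⟩
      · simp [List.find?, hp] at h

-- A's foldl step never increases the accumulator
theorem pvFold_le_init (cs : List Char) (ps : List (List Char)) (m : Int) :
    ps.foldl (fun m phrase => if PySem.Chars.isIn phrase cs then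
      (if PySem.Chars.find cs phrase < m then PySem.Chars.find cs phrase else m) else m) m ≤ m := by
  induction ps generalizing m with
  | nil => simp
  | cons p ps ih =>
    simp only [List.foldl_cons]
    refine le_trans (ih _) ?_
    split_ifs <;> omega

theorem pvFold_le_find (cs : List Char) (ps : List (List Char)) (m : Int) (p : List Char)
    (hp : p ∈ ps) (hin : PySem.Chars.isIn p cs = true) :
    ps.foldl (fun m phrase => if PySem.Chars.isIn phrase cs then
      (if PySem.Chars.find cs phrase < m then PySem.Chars.find cs phrase else m) else m) m
      ≤ PySem.Chars.find cs p := by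
  induction ps generalizing m with
  | nil => simp at hp
  | cons q ps ih =>
    simp only [List.foldl_cons]
    rcases List.mem_cons.mp hp with rfl | hp'
    · refine le_trans (pvFold_le_init ..) ?_
      simp only [hin, if_true]
      split_ifs <;> omega
    · exact ih _ hp'

theorem pvFold_cases (cs : List Char) (ps : List (List Char)) (m : Int) :
    ps.foldl (fun m phrase => if PySem.Chars.isIn phrase cs then
      (if PySem.Chars.find cs phrase < m then PySem.Chars.find cs phrase else m) else m) m = m
    ∨ ∃ p ∈ ps, PySem.Chars.isIn p cs = true ∧
      ps.foldl (fun m phrase => if PySem.Chars.isIn phrase cs then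
        (if PySem.Chars.find cs phrase < m then PySem.Chars.find cs phrase else m) else m) m
        = PySem.Chars.find cs p := by
  induction ps generalizing m with
  | nil => simp
  | cons q ps ih =>
    simp only [List.foldl_cons]
    rcases ih (if PySem.Chars.isIn q cs then
      (if PySem.Chars.find cs q < m then PySem.Chars.find cs q else m) else m) with h | ⟨p, hp, hin, h⟩
    · rw [h]
      split_ifs with h1 h2
      · exact Or.inr ⟨q, List.mem_cons_self .., h1, rfl⟩
      · exact Or.inl rfl
      · exact Or.inl rfl
    · exact Or.inr ⟨p, List.mem_cons_of_mem _ hp, hin, h⟩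

-- a singleton list is a prefix iff the head matches
theorem pvSingleton_isPrefixOf (c : Char) (l : List Char) :
    [c].isPrefixOf l = (l.head? == some c) := by
  cases l <;> simp [List.isPrefixOf, eq_comm]

theorem pvGo_le (s sub : List Char) : ∀ k, PySem.Chars.rfind.go s sub k ≤ (k : Int) := by
  intro k
  induction k with
  | zero => simp [PySem.Chars.rfind.go]; split_ifs <;> omega
  | succ j ih =>
    rw [PySem.Chars.rfind.go]
    split_ifs with h
    · omega
    · omega
-- max of the three single-char rfind scans = first hit of a combined backward scan
theorem pvMax3_go (s : List Char) : ∀ k,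
    max (max (PySem.Chars.rfind.go s ['.'] k) (PySem.Chars.rfind.go s [','] k))
        (PySem.Chars.rfind.go s [';'] k)
    = (((List.range (k+1)).reverse.find?
        (fun j => decide (s[j]? = some '.' ∨ s[j]? = some ',' ∨ s[j]? = some ';'))).elim
        (-1) (fun j => (j : Int))) := by
  intro k
  induction k with
  | zero =>
    simp only [PySem.Chars.rfind.go.eq_1, pvSingleton_isPrefixOf, List.head?_eq_getElem?]
    rcases h : s[0]? with _ | c
    · simp [h]
    · by_cases h1 : c = '.' <;> by_cases h2 : c = ',' <;> by_cases h3 : c = ';' <;>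
        simp_all
  | succ j ih =>
    have hrange : (List.range (j+1+1)).reverse = (j+1) :: (List.range (j+1)).reverse := by
      rw [List.range_succ, List.reverse_append]; rfl
    rw [hrange, PySem.Chars.rfind.go.eq_2 s ['.'] j, PySem.Chars.rfind.go.eq_2 s [','] j,
        PySem.Chars.rfind.go.eq_2 s [';'] j]
    simp only [pvSingleton_isPrefixOf, List.head?_drop, List.find?]
    rcases h : s[j+1]? with _ | c
    · simpa [h] using ih
    · have g1 := pvGo_le s ['.'] j
      have g2 := pvGo_le s [','] j
      have g3 := pvGo_le s [';'] j
      by_cases h1 : c = '.' <;> by_cases h2 : c = ',' <;> by_cases h3 : c = ';' <;>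
        simp_all <;> omega
theorem pvTail_eq (cut : List Char) :
    max (max (PySem.Chars.rfind cut ['.']) (PySem.Chars.rfind cut [',']))
        (PySem.Chars.rfind cut [';'])
    = (((List.range cut.length).reverse.find?
        (fun j => decide (cut[j]? = some '.' ∨ cut[j]? = some ',' ∨ cut[j]? = some ';'))).elim
        (-1) (fun j => (j : Int))) := by
  have h := pvMax3_go cut cut.length
  have hrange : (List.range (cut.length+1)).reverse = cut.length :: (List.range cut.length).reverse := by
    rw [List.range_succ, List.reverse_append]; rfl
  rw [hrange] at h
  simp only [PySem.Chars.rfind]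
  rw [h, List.find?]
  simp
theorem pvPhrases_ne_nil : ∀ q ∈ pvPhrasesA, q ≠ [] := by decide

theorem pvMain (s : String) : post_process_prefix s = post_process_prefix_alt s := by
  simp only [post_process_prefix, post_process_prefix_alt]
  have hPhrB : pvPhrasesB = pvPhrasesA := rfl
  rw [hPhrB]
  set cs := s.toList with hcs
  cases hscan : (List.range cs.length).find?
      (fun i => pvPhrasesA.any (fun p => PySem.Chars.startswith (cs.drop i) p)) with
  | none =>
    have hno : ∀ p ∈ pvPhrasesA, PySem.Chars.isIn p cs = false := by
      intro p hp
      by_contra hcon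
      have hin : PySem.Chars.isIn p cs = true := by
        simpa using hcon
      have hinf : p <:+: cs := (PySem.Chars.isIn_iff_infix ..).mp hin
      have hnn : 0 ≤ PySem.Chars.find cs p := (PySem.Chars.find_nonneg_iff ..).mpr hinf
      obtain ⟨hpre, -⟩ := PySem.Chars.find_spec hnn
      have hne : p ≠ [] := pvPhrases_ne_nil p hp
      have hle := PySem.Chars.find_le_length (s := cs) (sub := p)
      have hlt : (PySem.Chars.find cs p).toNat < cs.length := by
        rcases Nat.lt_or_ge (PySem.Chars.find cs p).toNat cs.length with h | h
        · exact h
        · exfalso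
          have : (PySem.Chars.find cs p).toNat = cs.length := by omega
          rw [this, List.drop_length] at hpre
          exact hne (List.prefix_nil.mp hpre)
      have hfalse := pvRange_find?_none hscan _ hlt
      simp only [List.any_eq_false, PySem.Chars.startswith] at hfalse
      exact hfalse p hp ((List.isPrefixOf_iff_prefix).mpr hpre)
    rcases pvFold_cases cs pvPhrasesA (cs.length : Int) with hM | ⟨p1, hp1, hin1, -⟩
    · rw [hM]; simp
    · rw [hno p1 hp1] at hin1; exact absurd hin1 (by simp)
  | some i =>
    obtain ⟨hilt, hpi, hminsc⟩ := pvRange_find?_some hscan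
    simp only [List.any_eq_true, PySem.Chars.startswith] at hpi
    obtain ⟨p0, hp0, hpre0⟩ := hpi
    have hpre0' : p0 <+: cs.drop i := (List.isPrefixOf_iff_prefix).mp hpre0
    have hin0 : PySem.Chars.isIn p0 cs = true :=
      (PySem.Chars.exists_prefix_drop_iff_isIn ..).mp ⟨i, hpre0'⟩
    have hnn0 : 0 ≤ PySem.Chars.find cs p0 :=
      (PySem.Chars.find_nonneg_iff ..).mpr ((PySem.Chars.isIn_iff_infix ..).mp hin0)
    have hfle : (PySem.Chars.find cs p0).toNat ≤ i := by
      by_contra h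
      rw [Nat.not_le] at h
      exact ((PySem.Chars.find_spec hnn0).2 i h) hpre0'
    have hMval :
        pvPhrasesA.foldl (fun m phrase => if PySem.Chars.isIn phrase cs then
          (if PySem.Chars.find cs phrase < m then PySem.Chars.find cs phrase else m) else m)
          ((cs.length : Int)) = (i : Int) := by
      have hMle := pvFold_le_find cs pvPhrasesA ((cs.length : Int)) p0 hp0 hin0
      rcases pvFold_cases cs pvPhrasesA ((cs.length : Int)) with hM | ⟨p1, hp1, hin1, hM⟩
      · exfalso; rw [hM] at hMle; omega
      · have hnn1 : 0 ≤ PySem.Chars.find cs p1 :=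
          (PySem.Chars.find_nonneg_iff ..).mpr ((PySem.Chars.isIn_iff_infix ..).mp hin1)
        obtain ⟨hpre1, -⟩ := PySem.Chars.find_spec hnn1
        have hge : i ≤ (PySem.Chars.find cs p1).toNat := by
          by_contra h
          rw [Nat.not_le] at h
          have hf := hminsc _ h
          simp only [List.any_eq_false, PySem.Chars.startswith] at hf
          exact hf p1 hp1 ((List.isPrefixOf_iff_prefix).mpr hpre1)
        rw [hM] at hMle ⊢
        omega
    rw [hMval]
    have hcond : ((i : Int) < (cs.length : Int)) := by exact_mod_cast hilt
    simp only [hcond, if_true]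
    set cut := PySem.Chars.strip (PySem.Chars.slice cs none (some (i : Int))) with hcut
    rw [pvTail_eq cut]
    cases hfp : (List.range cut.length).reverse.find?
        (fun j => decide (cut[j]? = some '.' ∨ cut[j]? = some ',' ∨ cut[j]? = some ';')) with
    | none => simp
    | some jp =>
      have : ((jp : Int)) ≠ -1 := by omega
      simp [this]

-- ===== VERDICT (by name: the statement is the Claim_ definition above) =====
theorem post_process_prefix_spec : Claim_equal_post_process_prefix := by
  intro s _
  unfold Spec_post_process_prefix
  exact pvMain s
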